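-- pv_equiv track=rewrite | github.com/iruletheworld/myLib | myMain.py | intLastMin
-- ===== SOURCE A (Python) =====
-- def intLastMin(list_numeric):
--     '''
--     .. _intLastMin :
--
--     This function scans the list from the end; finds the first smallest value and then returns
--     its index.
--
--     Parameters
--     ----------
--     list_numeric : list
--         The list to be scanned.
--
--         Ideally a numeric list (int or float). String lists also seems to work, but you need to know
--         what it means for string lists.
--
--     Returns
--     -------
--     j : int
--         The index of the last smallest element in the input list.
--
--     Examples
--     --------
--     .. code:: python
--
--         >>> from gsyMain import *
--         >>> a = [1, 2, 3, 1, 4]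
--         >>> b = intLastMin(a)
--         >>> b
--         3
--         >>> a[b]
--         1
--         >>>
--     '''
--
--     # begin from the last element
--     i = len(list_numeric) - 1
--
--     # initialisation
--     j = 0
--
--     # while loop search
--     while i >= 1:
--
--         # set old value as the current indexed one
--         old = list_numeric[i]
--
--         # new value as the one before the old one
--         new = list_numeric[i - 1]
--
--         # if the new value is smaller than the old one,
--         # need to look for the next one
--         if new < old:
--
--             # since the new is smaller than the old,
--             # set the var holding the stat to the index
--             # of the one before the old
--             j = i - 1
--
--             pass
--
--         # if the new value if bigger than the old one,
--         # that means the last smallest is found, break loop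
--         else:
--
--             # since the old one is smaller the new one,
--             # set the state var to the old one's index
--             j = i
--
--             break
--
--         # index decrement
--         i -= 1
--
--     # return the index found
--     return j
-- ===== SOURCE B (Python) =====
-- def intLastMin(list_numeric):
--     # index of the last "smallest" element: the largest breakpoint k where the
--     # ascent list_numeric[k-1] < list_numeric[k] fails, or 0 if the list ascends throughout
--     return max((k for k in range(1, len(list_numeric))
--                 if not (list_numeric[k - 1] < list_numeric[k])),
--                default=0)
-- ===== Notes on version B (the rewrite author's own statement) =====
-- stated objective: simpler
-- what changed: Replaces the backward early-break while loop carrying a state variable with a single forward comprehension: the answer is the largest index k in [1, n-1] where the ascent fails, computed as max(..., default=0).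
import Mathlib
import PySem

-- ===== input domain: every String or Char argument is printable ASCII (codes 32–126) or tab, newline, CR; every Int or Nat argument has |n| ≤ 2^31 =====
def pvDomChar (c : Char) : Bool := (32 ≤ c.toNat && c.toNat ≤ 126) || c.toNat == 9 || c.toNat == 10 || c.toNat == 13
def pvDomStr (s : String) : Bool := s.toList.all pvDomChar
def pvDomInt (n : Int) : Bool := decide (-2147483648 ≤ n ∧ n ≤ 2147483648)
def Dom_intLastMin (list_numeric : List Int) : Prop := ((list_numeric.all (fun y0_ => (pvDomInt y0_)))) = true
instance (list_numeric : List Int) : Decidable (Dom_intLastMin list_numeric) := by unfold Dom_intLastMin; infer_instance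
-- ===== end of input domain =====

-- B replaces A's backward early-break while loop with a forward comprehension:
-- max (default 0) of the indices k in [1, n-1] where list[k-1] < list[k] fails (simpler decomposition, same cost).


-- ===== PORT A =====
-- the while loop: i counts down, j is the state variable; break returns i, normal exit returns j
def intLastMinLoop (list_numeric : List Int) (i : Nat) (j : Int) : Int :=
  match i with
  | 0 => j
  | i' + 1 =>
    let old := PySem.List.pyGetD list_numeric ((i' : Int) + 1) 0
    let new := PySem.List.pyGetD list_numeric (i' : Int) 0
    if new < old then intLastMinLoop list_numeric i' (i' : Int)
    else (i' : Int) + 1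

def intLastMin (list_numeric : List Int) : Int :=
  intLastMinLoop list_numeric (list_numeric.length - 1) 0

-- ===== PORT B =====
def intLastMin_alt (list_numeric : List Int) : Int :=
  PySem.List.maxD
    ((PySem.List.pyRange 1 (list_numeric.length : Int) 1).filter
      (fun k => !decide (PySem.List.pyGetD list_numeric (k - 1) 0 <
                         PySem.List.pyGetD list_numeric k 0)))
    (fun k => k) 0

-- ===== PRECONDITION & SPEC =====
def Spec_intLastMin (list_numeric : List Int) (out : Int) : Prop := out = intLastMin_alt list_numeric
instance (list_numeric : List Int) (out : Int) : Decidable (Spec_intLastMin list_numeric out) := by unfold Spec_intLastMin; infer_instance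

-- ===== CLAIM (what is proved, stated in full; the proofs are below) =====
def Claim_equal_intLastMin : Prop := ∀ (list_numeric : List Int), Dom_intLastMin list_numeric → Spec_intLastMin list_numeric (intLastMin list_numeric)

-- ===== LEMMAS AND PROOFS =====

-- Python's max(xs, default=0) with nonnegative elements is the running max from 0
theorem maxD_id_eq_foldl (xs : List Int) (h : ∀ x ∈ xs, 0 ≤ x) :
    PySem.List.maxD xs (fun k => k) 0 = xs.foldl max 0 := by
  cases xs with
  | nil => rfl
  | cons x t =>
    simp [PySem.List.maxD, PySem.List.max?_id_cons, List.foldl]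
    have : max 0 x = x := max_eq_right (h x (by simp))
    rw [this]

-- the loop result as a running max over the breakpoints among 1..i
theorem loop_eq_foldl (l : List Int) (i : Nat) :
    intLastMinLoop l i 0 =
      ((PySem.List.pyRange 1 ((i : Int) + 1) 1).filter
        (fun k => !decide (PySem.List.pyGetD l (k - 1) 0 < PySem.List.pyGetD l k 0))).foldl max 0 := by
  induction i with
  | zero =>
    rw [PySem.List.pyRange_one_eq_nil (by norm_num)]
    rfl
  | succ i ih =>
    have hsplit : PySem.List.pyRange 1 (((i + 1 : Nat) : Int) + 1) 1 =
        PySem.List.pyRange 1 ((i : Int) + 1) 1 ++ [(i : Int) + 1] := by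
      push_cast
      exact PySem.List.pyRange_one_succ_right (by omega)
    rw [hsplit, List.filter_append, List.foldl_append]
    by_cases hb : PySem.List.pyGetD l (i : Int) 0 < PySem.List.pyGetD l ((i : Int) + 1) 0
    · -- ascent continues: the loop recurses, index i+1 is filtered out
      have hfilt : List.filter
          (fun k => !decide (PySem.List.pyGetD l (k - 1) 0 < PySem.List.pyGetD l k 0))
          [(i : Int) + 1] = [] := by
        simp only [List.filter_cons, List.filter_nil, add_sub_cancel_right,
          decide_eq_true hb, Bool.not_true]
        rfl
      rw [hfilt]
      simp only [List.foldl_nil]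
      rw [← ih]
      show intLastMinLoop l (i + 1) 0 = intLastMinLoop l i 0
      simp only [intLastMinLoop]
      rw [if_pos hb]
      cases i with
      | zero => simp [intLastMinLoop]
      | succ i' => simp only [intLastMinLoop]
    · -- breakpoint at i+1: the loop breaks with i+1, which dominates all earlier breakpoints
      have hfilt : List.filter
          (fun k => !decide (PySem.List.pyGetD l (k - 1) 0 < PySem.List.pyGetD l k 0))
          [(i : Int) + 1] = [(i : Int) + 1] := by
        simp only [List.filter_cons, List.filter_nil, add_sub_cancel_right,
          decide_eq_false hb, Bool.not_false]
        simp
      rw [hfilt]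
      have hle : (List.filter
          (fun k => !decide (PySem.List.pyGetD l (k - 1) 0 < PySem.List.pyGetD l k 0))
          (PySem.List.pyRange 1 ((i : Int) + 1) 1)).foldl max 0 ≤ (i : Int) + 1 := by
        rcases PySem.List.foldl_max_mem (List.filter
            (fun k => !decide (PySem.List.pyGetD l (k - 1) 0 < PySem.List.pyGetD l k 0))
            (PySem.List.pyRange 1 ((i : Int) + 1) 1)) 0 with h0 | hm
        · rw [h0]; positivity
        · have := (PySem.List.mem_pyRange_one.mp (List.mem_of_mem_filter hm)).2
          omega
      simp only [List.foldl_cons, List.foldl_nil]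
      rw [max_eq_right hle]
      simp only [intLastMinLoop]
      rw [if_neg hb]

theorem filtered_nonneg (l : List Int) (n : Int)
    (x : Int)
    (hx : x ∈ (PySem.List.pyRange 1 n 1).filter
      (fun k => !decide (PySem.List.pyGetD l (k - 1) 0 < PySem.List.pyGetD l k 0))) : 0 ≤ x := by
  have := (PySem.List.mem_pyRange_one.mp (List.mem_of_mem_filter hx)).1
  omega

-- ===== VERDICT (by name: the statement is the Claim_ definition above) =====
theorem intLastMin_spec : Claim_equal_intLastMin := by
  intro l _
  show intLastMin l = intLastMin_alt l
  unfold intLastMin intLastMin_alt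
  rw [maxD_id_eq_foldl _ (filtered_nonneg l _)]
  cases l with
  | nil => rfl
  | cons x t =>
    rw [loop_eq_foldl]
    congr 2
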